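-- pv_equiv track=rewrite | github.com/yashbalan/Final_Assignment | Q13.py | check
-- ===== SOURCE A (Python) =====
-- from collections import Counter
--
-- def check(s, k):
--     if k == 0:
--         counts = Counter(s)
--         if len(set(counts.values())) == 1:
--             return s
--         return ''
--
--     n = len(s)
--     if k >= n:
--         return ''
--
--     counts = Counter(s)
--
--     for target in range(max(counts.values()), 0, -1):
--         removal_needed = 0
--         possible = True
--
--         for char, cnt in counts.items():
--             if cnt > target:
--                 removal_needed += (cnt - target)
--             elif cnt < target:
--                 possible = False
--                 break
--
--         if possible and removal_needed <= k:
--             result = []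
--             remaining = k - removal_needed
--             temp_counts = counts.copy()
--
--             for char in s:
--                 if temp_counts[char] > target and remaining > 0:
--                     remaining -= 1
--                     temp_counts[char] -= 1
--                 else:
--                     if temp_counts[char] > 0:
--                         result.append(char)
--                         temp_counts[char] -= 1
--
--             return ''.join(result)
--
--     return ''
-- ===== SOURCE B (Python) =====
-- from collections import Counter
--
-- # One-pass O(n): the only achievable target frequency is min(counts.values());
-- # delete the first (cnt - target) occurrences of each character.
-- # Intended fix kept natural: when removal_needed <= k < 2*removal_needed A stops
-- # deleting early and returns a string with unequal frequencies; B equalizes.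
-- def check(s, k):
--     if not s or k >= len(s):
--         return ''
--     counts = Counter(s)
--     target = min(counts.values())
--     need = sum(cnt - target for cnt in counts.values())
--     if need > k:
--         return ''
--     skip = {c: cnt - target for c, cnt in counts.items()}
--     out = []
--     for ch in s:
--         if skip[ch] > 0:
--             skip[ch] -= 1
--         else:
--             out.append(ch)
--     return ''.join(out)
-- ===== Notes on version B (the rewrite author's own statement) =====
-- stated objective: faster
-- what changed: Instead of scanning candidate targets from max(count) downward with a feasibility pass over the counter for each (only target=min(count) can ever succeed), B computes target=min(count) and the needed removals directly and builds the result in one pass, skipping the first (cnt-target) occurrences of each character.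
-- intended difference: On inputs with 0<k<len(s) and removal_needed<=k<2*removal_needed, A decrements its leftover budget remaining=k-removal_needed on every deletion and so stops early, returning a string with UNEQUAL frequencies (e.g. check('aab',1)='aab'), while B performs all removal_needed deletions and returns the equalized string ('ab'), which is the function's stated purpose. — e.g. on check("aab", 1): A returns "aab", B returns "ab"
import Mathlib
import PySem

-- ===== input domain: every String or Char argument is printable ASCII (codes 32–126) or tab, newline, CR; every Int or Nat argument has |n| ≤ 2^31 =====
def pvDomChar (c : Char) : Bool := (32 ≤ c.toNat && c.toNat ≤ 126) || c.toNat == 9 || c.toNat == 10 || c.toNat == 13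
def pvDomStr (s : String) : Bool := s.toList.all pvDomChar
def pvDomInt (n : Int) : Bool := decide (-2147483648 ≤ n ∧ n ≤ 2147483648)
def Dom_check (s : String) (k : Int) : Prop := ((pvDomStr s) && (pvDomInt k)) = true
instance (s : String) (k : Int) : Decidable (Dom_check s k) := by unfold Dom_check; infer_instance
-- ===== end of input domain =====

-- B replaces A's descending scan over candidate target frequencies (a counter pass per candidate)
-- by computing the only feasible target, min(count), directly and building the answer in one pass;
-- on inputs where A's budget bug leaves frequencies unequal, B returns the fully equalized string (see D_check).

-- ===== PORT A =====
-- the inner 'for char, cnt in counts.items()' feasibility loop with its break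
def checkFeas (target : Int) : List (Char × Int) → Int → Bool × Int
  | [], removal => (true, removal)
  | (_, cnt) :: rest, removal =>
    if cnt > target then checkFeas target rest (removal + (cnt - target))
    else if cnt < target then (false, removal)
    else checkFeas target rest removal

-- one step of A's result-building loop: state (result, remaining, temp_counts)
def checkBuildStep (target : Int) (st : List Char × Int × PySem.Dict Char Int) (ch : Char) :
    List Char × Int × PySem.Dict Char Int :=
  if st.2.2.getD ch 0 > target ∧ st.2.1 > 0 then (st.1, st.2.1 - 1, st.2.2.modify ch 0 (· - 1))
  else if st.2.2.getD ch 0 > 0 then (st.1 ++ [ch], st.2.1, st.2.2.modify ch 0 (· - 1))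
  else st

-- 'for target in range(max(...), 0, -1)'
def checkLoop (cs : List Char) (counts : PySem.Dict Char Int) (k : Int) : List Int → String
  | [] => ""
  | target :: rest =>
    let fr := checkFeas target counts.items 0
    if fr.1 = true ∧ fr.2 ≤ k then
      String.ofList ((cs.foldl (checkBuildStep target) ([], k - fr.2, counts)).1)
    else checkLoop cs counts k rest

def check (s : String) (k : Int) : String :=
  let cs := s.toList
  if k = 0 then
    let counts := PySem.Dict.counter cs
    if ((PySem.Set.ofList counts.values : List Int)).length = 1 then s else ""
  else if k ≥ (cs.length : Int) then ""
  else
    let counts := PySem.Dict.counter cs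
    match PySem.List.max? counts.values (fun v => v) with
    | none => ""   -- totality guard: values = [] only when s = "" ∧ k < 0, where Python raises (outside Pre_)
    | some mx => checkLoop cs counts k (PySem.List.pyRange mx 0 (-1))

-- ===== PORT B =====
-- one step of B's single pass: skip a char while its skip budget is positive
def checkAltStep (st : List Char × PySem.Dict Char Int) (ch : Char) :
    List Char × PySem.Dict Char Int :=
  if st.2.getD ch 0 > 0 then (st.1, st.2.modify ch 0 (· - 1))
  else (st.1 ++ [ch], st.2)

def check_alt (s : String) (k : Int) : String :=
  let cs := s.toList
  if cs.isEmpty ∨ k ≥ (cs.length : Int) then ""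
  else
    let counts := PySem.Dict.counter cs
    match PySem.List.min? counts.values (fun v => v) with
    | none => ""   -- unreachable: cs ≠ []
    | some target =>
      let need := (counts.values.map (fun cnt => cnt - target)).sum
      if need > k then ""
      else
        let skip := counts.items.foldl (fun d (p : Char × Int) => d.insert p.1 (p.2 - target)) PySem.Dict.empty
        String.ofList ((cs.foldl checkAltStep ([], skip)).1)

-- ===== PRECONDITION & SPEC =====
-- input-shape helpers for D_check: the distinct-character frequencies of s, their minimum, and the
-- number of deletions needed to bring every frequency down to that minimum
def pvFreqs (cs : List Char) : List Int := (PySem.Set.ofList cs : List Char).map fun c => (cs.count c : Int)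
def pvNeed (cs : List Char) : Int :=
  match pvFreqs cs with
  | [] => 0
  | v :: t => ((v :: t).map fun w => w - t.foldl min v).sum

-- Pre_ excludes only s = "" with k < 0, where A reaches max() of an empty sequence and raises ValueError
def Pre_check (s : String) (k : Int) : Prop := ¬(s = "" ∧ k < 0)
instance (s : String) (k : Int) : Decidable (Pre_check s k) := by unfold Pre_check; infer_instance
def pvWitness_check : String × Int := ("aab", 2)

-- On inputs with k ≠ 0, k < len(s) and need ≤ k < 2*need (need = deletions required to equalize),
-- A decrements its leftover budget k-need on every deletion and stops early, returning a string with
-- UNEQUAL frequencies (e.g. check('aab',1) = 'aab'); B performs all needed deletions and returns the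
-- equalized string ('ab'), which is the function's purpose.
def D_check (s : String) (k : Int) : Prop :=
  k ≠ 0 ∧ k < (s.toList.length : Int) ∧ pvNeed s.toList ≤ k ∧ k < 2 * pvNeed s.toList
instance (s : String) (k : Int) : Decidable (D_check s k) := by unfold D_check; infer_instance

def Spec_check (s : String) (k : Int) (out : String) : Prop := ¬ D_check s k → out = check_alt s k
instance (s : String) (k : Int) (out : String) : Decidable (Spec_check s k out) := by unfold Spec_check; infer_instance

def pvDiffWitness_check : String × Int := ("aab", 1)
def pvDiffWitnessOut_check : String × String := ("aab", "ab")

-- ===== CLAIM (what is proved, stated in full; the proofs are below) =====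
def Claim_unchanged_check : Prop := ∀ (s : String) (k : Int), Dom_check s k → Pre_check s k → Spec_check s k (check s k)
def Claim_exact_check : Prop := ∀ (s : String) (k : Int), Dom_check s k → Pre_check s k → D_check s k → check s k ≠ check_alt s k
def Claim_changed_check : Prop := Dom_check (pvDiffWitness_check.1) (pvDiffWitness_check.2) ∧ Pre_check (pvDiffWitness_check.1) (pvDiffWitness_check.2) ∧ D_check (pvDiffWitness_check.1) (pvDiffWitness_check.2) ∧ check (pvDiffWitness_check.1) (pvDiffWitness_check.2) = pvDiffWitnessOut_check.1 ∧ check_alt (pvDiffWitness_check.1) (pvDiffWitness_check.2) = pvDiffWitnessOut_check.2 ∧ pvDiffWitnessOut_check.1 ≠ pvDiffWitnessOut_check.2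

-- ===== LEMMAS AND PROOFS =====

-- proof-side name for the minimum frequency (D_check inlines it)
def pvMn (cs : List Char) : Int := match pvFreqs cs with | [] => 0 | v :: t => t.foldl min v

theorem pv_values_counter (cs : List Char) : (PySem.Dict.counter cs).values = pvFreqs cs := by
  simp [PySem.Dict.values, PySem.Dict.items_counter, pvFreqs, List.map_map]

-- feasibility pass: all counts ≥ target ⇒ (true, acc + Σ (cnt - target))
theorem pv_feas_true (target : Int) (items : List (Char × Int)) (acc : Int)
    (h : ∀ p ∈ items, target ≤ p.2) :
    checkFeas target items acc = (true, acc + ((items.map (fun p => p.2 - target)).sum)) := by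
  induction items generalizing acc with
  | nil => simp [checkFeas]
  | cons p rest ih =>
    obtain ⟨c, cnt⟩ := p
    have hle : target ≤ cnt := h (c, cnt) (by simp)
    have hrest : ∀ q ∈ rest, target ≤ q.2 := fun q hq => h q (by simp [hq])
    by_cases hgt : cnt > target
    · simp only [checkFeas, if_pos hgt, ih _ hrest, List.map_cons, List.sum_cons]
      congr 1; ring
    · have heq : cnt = target := le_antisymm (not_lt.mp hgt) hle
      simp only [checkFeas, if_neg hgt]
      rw [if_neg (by omega)]
      rw [ih _ hrest]
      simp [heq]

-- feasibility pass: some count < target ⇒ not possible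
theorem pv_feas_false (target : Int) (items : List (Char × Int)) (acc : Int)
    (h : ∃ p ∈ items, p.2 < target) : (checkFeas target items acc).1 = false := by
  induction items generalizing acc with
  | nil => simp at h
  | cons p rest ih =>
    obtain ⟨c, cnt⟩ := p
    by_cases hgt : cnt > target
    · have hrest : ∃ q ∈ rest, q.2 < target := by
        obtain ⟨q, hq, hlt⟩ := h
        rcases List.mem_cons.mp hq with rfl | hm
        · omega
        · exact ⟨q, hm, hlt⟩
      simp only [checkFeas, if_pos hgt]
      exact ih _ hrest
    · by_cases hlt : cnt < target
      · simp [checkFeas, hgt, hlt]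
      · have hrest : ∃ q ∈ rest, q.2 < target := by
          obtain ⟨q, hq, hl⟩ := h
          rcases List.mem_cons.mp hq with rfl | hm
          · simp at hl; omega
          · exact ⟨q, hm, hl⟩
        simp only [checkFeas, if_neg hgt, if_neg hlt]
        exact ih _ hrest

-- generic: sum over a Nodup list when one value is decremented
theorem pv_sum_map_update (K : List Char) (f g : Char → Int) (ch : Char)
    (hnd : K.Nodup) (hch : ch ∈ K) (hg : ∀ c, g c = if c = ch then f c - 1 else f c) :
    (K.map g).sum = (K.map f).sum - 1 := by
  induction K with
  | nil => simp at hch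
  | cons x t ih =>
    simp only [List.map_cons, List.sum_cons]
    by_cases hx : x = ch
    · subst hx
      have hmap : t.map g = t.map f := by
        apply List.map_congr_left
        intro c hc
        have hcx : c ≠ x := fun h => (List.nodup_cons.mp hnd).1 (h ▸ hc)
        simp [hg c, hcx]
      rw [hmap, hg x, if_pos rfl]; ring
    · have hnd' := (List.nodup_cons.mp hnd).2
      have hmem : ch ∈ t := by
        rcases List.mem_cons.mp hch with h | h
        · exact absurd h.symm hx
        · exact h
      rw [ih hnd' hmem, hg x, if_neg hx]; ring

theorem pv_single_le_sum (K : List Char) (f : Char → Int) (ch : Char)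
    (hch : ch ∈ K) (hnn : ∀ c ∈ K, 0 ≤ f c) : f ch ≤ (K.map f).sum := by
  apply List.single_le_sum
  · intro x hx
    obtain ⟨c, hc, rfl⟩ := List.mem_map.mp hx
    exact hnn c hc
  · exact List.mem_map.mpr ⟨ch, hch, rfl⟩

theorem pv_keys_modify_mem {d : PySem.Dict Char Int} {ch : Char} (h : ch ∈ d.keys) (f : Int → Int) :
    (d.modify ch 0 f).keys = d.keys := by
  rw [PySem.Dict.keys_modify]
  have hc : d.contains ch = true := by
    rw [PySem.Dict.contains_eq_decide_mem_keys]; simpa using h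
  rw [show (d.insert ch (f (d.getD ch 0))).keys
      = ((d.insert ch (f (d.getD ch 0))).items).map Prod.fst from rfl]
  rw [PySem.Dict.items_insert_of_contains _ _ hc]
  rw [List.map_map]
  conv_rhs => rw [show d.keys = d.items.map Prod.fst from rfl]
  apply List.map_congr_left
  intro p _
  by_cases hp : p.1 = ch
  · simp [hp]
  · simp [hp]

-- the central invariant: A's build loop (with enough budget) and B's skip loop keep the same chars
theorem pv_build_eq (mn : Int) :
    ∀ (suffix res : List Char) (rem : Int) (temp skip : PySem.Dict Char Int),
    (∀ c, skip.getD c 0 = max (temp.getD c 0 - mn) 0) →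
    (∀ c, (suffix.count c : Int) ≤ temp.getD c 0) →
    skip.keys.Nodup →
    (∀ c ∈ suffix, c ∈ skip.keys) →
    (skip.keys.map (fun c => skip.getD c 0)).sum ≤ rem →
    (suffix.foldl (checkBuildStep mn) (res, rem, temp)).1 = (suffix.foldl checkAltStep (res, skip)).1 := by
  intro suffix
  induction suffix with
  | nil => intro res rem temp skip _ _ _ _ _; rfl
  | cons ch t ih =>
    intro res rem temp skip hmax hcnt hnd hmem hsum
    have hchK : ch ∈ skip.keys := hmem ch (by simp)
    have hnn : ∀ c ∈ skip.keys, 0 ≤ skip.getD c 0 := by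
      intro c _; rw [hmax c]; exact le_max_right _ _
    have hcount1 : (1 : Int) ≤ ((ch :: t).count ch : Int) := by
      simp
    have hcountc : ∀ c, (t.count c : Int) ≤ ((ch :: t).count c : Int) := by
      intro c
      have h : t.count c ≤ (ch :: t).count c := by
        simp only [List.count_cons]; split <;> omega
      exact_mod_cast h
    simp only [List.foldl_cons]
    by_cases hpos : skip.getD ch 0 > 0
    -- delete branch
    · have htgt : temp.getD ch 0 > mn := by
        have h := hmax ch
        by_cases hm : temp.getD ch 0 - mn ≤ 0
        · rw [max_eq_right hm] at h; omega
        · omega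
      have hrem : rem > 0 := by
        have h1 : skip.getD ch 0 ≤ (skip.keys.map (fun c => skip.getD c 0)).sum :=
          pv_single_le_sum skip.keys (fun c => skip.getD c 0) ch hchK hnn
        omega
      rw [show checkBuildStep mn (res, rem, temp) ch
          = (res, rem - 1, temp.modify ch 0 (· - 1)) by
        simp [checkBuildStep, htgt, hrem]]
      rw [show checkAltStep (res, skip) ch = (res, skip.modify ch 0 (· - 1)) by
        simp [checkAltStep, hpos]]
      apply ih
      · intro c
        rw [PySem.Dict.getD_modify, PySem.Dict.getD_modify]
        by_cases hc : c = ch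
        · rw [if_pos hc, if_pos hc, hmax ch]
          have h := hmax ch
          omega
        · rw [if_neg hc, if_neg hc, hmax c]
      · intro c
        rw [PySem.Dict.getD_modify]
        by_cases hc : c = ch
        · rw [if_pos hc]
          have h2 := hcnt ch
          have h3 : (t.count ch : Int) + 1 = ((ch :: t).count ch : Int) := by
            simp
          rw [hc]
          omega
        · rw [if_neg hc]
          have h2 := hcnt c
          have h3 := hcountc c
          omega
      · rw [pv_keys_modify_mem hchK]; exact hnd
      · intro c hc
        rw [pv_keys_modify_mem hchK]
        exact hmem c (by simp [hc])
      · rw [pv_keys_modify_mem hchK]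
        rw [pv_sum_map_update skip.keys (fun c => skip.getD c 0)
            (fun c => (skip.modify ch 0 (· - 1)).getD c 0) ch hnd hchK]
        · omega
        · intro c
          rw [PySem.Dict.getD_modify]
          by_cases hc : c = ch
          · rw [if_pos hc, if_pos hc, hc]
          · rw [if_neg hc, if_neg hc]
    -- keep branch
    · have hz : skip.getD ch 0 = 0 := le_antisymm (not_lt.mp hpos) (hnn ch hchK)
      have hle : temp.getD ch 0 ≤ mn := by
        have h := hmax ch
        by_cases hm : temp.getD ch 0 - mn ≤ 0
        · omega
        · rw [max_eq_left (by omega)] at h; omega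
      have htpos : temp.getD ch 0 > 0 := by
        have h2 := hcnt ch
        omega
      rw [show checkBuildStep mn (res, rem, temp) ch
          = (res ++ [ch], rem, temp.modify ch 0 (· - 1)) by
        simp [checkBuildStep, htpos]; omega]
      rw [show checkAltStep (res, skip) ch = (res ++ [ch], skip) by
        simp [checkAltStep, hz]]
      apply ih
      · intro c
        rw [PySem.Dict.getD_modify]
        by_cases hc : c = ch
        · rw [if_pos hc, hc, hz]
          exact (max_eq_right (by omega)).symm
        · rw [if_neg hc, hmax c]
      · intro c
        rw [PySem.Dict.getD_modify]
        by_cases hc : c = ch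
        · rw [if_pos hc]
          have h2 := hcnt ch
          have h3 : (t.count ch : Int) + 1 = ((ch :: t).count ch : Int) := by
            simp
          rw [hc]
          omega
        · rw [if_neg hc]
          have h2 := hcnt c
          have h3 := hcountc c
          omega
      · exact hnd
      · intro c hc; exact hmem c (by simp [hc])
      · exact hsum

-- B's loop keeps everything when every skip budget is zero
theorem pv_altfold_zero (suffix : List Char) :
    ∀ (res : List Char) (skip : PySem.Dict Char Int), (∀ c, skip.getD c 0 = 0) →
    (suffix.foldl checkAltStep (res, skip)).1 = res ++ suffix := by
  induction suffix with
  | nil => intro res skip _; simp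
  | cons ch t ih =>
    intro res skip hz
    simp only [List.foldl_cons]
    rw [show checkAltStep (res, skip) ch = (res ++ [ch], skip) by simp [checkAltStep, hz ch]]
    rw [ih _ _ hz]
    simp

-- the skip dict B builds: items, keys, lookups
theorem pv_skip0_items (cs : List Char) (mn : Int) :
    ((PySem.Dict.counter cs).items.foldl (fun d (p : Char × Int) => d.insert p.1 (p.2 - mn)) PySem.Dict.empty).items
      = (PySem.Set.ofList cs : List Char).map (fun c => (c, (cs.count c : Int) - mn)) := by
  rw [PySem.Dict.items_foldl_insert_fresh _ _ _ _ (fun a _ => PySem.Dict.contains_empty _)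
      (by rw [PySem.Dict.items_counter, List.map_map, show (Prod.fst ∘ fun k => (k, (cs.count k : Int))) = id from rfl, List.map_id]; exact PySem.Set.nodup_ofList cs)]
  rw [PySem.Dict.items_counter, List.map_map]
  rfl

theorem pv_skip0_keys (cs : List Char) (mn : Int) :
    ((PySem.Dict.counter cs).items.foldl (fun d (p : Char × Int) => d.insert p.1 (p.2 - mn)) PySem.Dict.empty).keys
      = (PySem.Set.ofList cs : List Char) := by
  rw [show ∀ d : PySem.Dict Char Int, d.keys = d.items.map Prod.fst from fun _ => rfl]
  rw [pv_skip0_items, List.map_map, show (Prod.fst ∘ fun c => (c, (cs.count c : Int) - mn)) = id from rfl, List.map_id]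

theorem pv_skip0_getD (cs : List Char) (mn : Int) (c : Char) :
    ((PySem.Dict.counter cs).items.foldl (fun d (p : Char × Int) => d.insert p.1 (p.2 - mn)) PySem.Dict.empty).getD c 0
      = if c ∈ cs then (cs.count c : Int) - mn else 0 := by
  by_cases hc : c ∈ cs
  · rw [if_pos hc]
    apply PySem.Dict.getD_of_mem_items
    · rw [pv_skip0_items]
      exact List.mem_map.mpr ⟨c, (PySem.Set.mem_ofList cs c).mpr hc, rfl⟩
    · rw [pv_skip0_keys]; exact PySem.Set.nodup_ofList cs
  · rw [if_neg hc]
    have hnk : c ∉ ((PySem.Dict.counter cs).items.foldl (fun d (p : Char × Int) => d.insert p.1 (p.2 - mn)) PySem.Dict.empty).keys := by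
      rw [pv_skip0_keys, PySem.Set.mem_ofList]; exact hc
    have := (PySem.Dict.get?_eq_none_iff_not_mem_keys _ c).mpr hnk
    simp [PySem.Dict.getD, this]

-- the target loop skips every target above mn
theorem pv_loop_skip (cs : List Char) (k t : Int) (rest : List Int)
    (hmem : ∃ p ∈ (PySem.Dict.counter cs).items, p.2 < t) :
    checkLoop cs (PySem.Dict.counter cs) k (t :: rest) = checkLoop cs (PySem.Dict.counter cs) k rest := by
  have hf := pv_feas_false t (PySem.Dict.counter cs).items 0 hmem
  simp only [checkLoop, hf]
  simp

theorem pv_loop_descend (cs : List Char) (k mn : Int) (hmn : 0 < mn)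
    (hlt : ∀ t : Int, mn < t → ∃ p ∈ (PySem.Dict.counter cs).items, p.2 < t) :
    ∀ (j : Nat), checkLoop cs (PySem.Dict.counter cs) k (PySem.List.pyRange (mn + j) 0 (-1))
      = checkLoop cs (PySem.Dict.counter cs) k (PySem.List.pyRange mn 0 (-1)) := by
  intro j
  induction j with
  | zero => norm_num
  | succ m ih =>
    have h1 : (0 : Int) < mn + (m + 1 : Nat) := by push_cast; omega
    rw [PySem.List.pyRange_neg_one_cons h1]
    rw [pv_loop_skip cs k _ _ (hlt _ (by push_cast; omega))]
    rw [show (mn + ((m : Nat) + 1 : Nat) : Int) - 1 = mn + (m : Nat) by push_cast; ring]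
    exact ih

-- every target ≤ mn needs more than k removals once pvNeed > k: loop returns ''
theorem pv_loop_allfail (cs : List Char) (k mn : Int)
    (hge : ∀ p ∈ (PySem.Dict.counter cs).items, mn ≤ p.2)
    (hr : ¬ (((PySem.Dict.counter cs).items.map (fun p => p.2 - mn)).sum ≤ k)) :
    ∀ (j : Nat) (a : Int), a ≤ mn → a ≤ (j : Int) →
      checkLoop cs (PySem.Dict.counter cs) k (PySem.List.pyRange a 0 (-1)) = "" := by
  intro j
  induction j with
  | zero =>
    intro a _ ha
    rw [PySem.List.pyRange_neg_one_eq_nil (by omega)]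
    rfl
  | succ m ih =>
    intro a hamn ha
    by_cases hpos : 0 < a
    · rw [PySem.List.pyRange_neg_one_cons hpos]
      have hgea : ∀ p ∈ (PySem.Dict.counter cs).items, a ≤ p.2 := fun p hp => le_trans hamn (hge p hp)
      have hf := pv_feas_true a (PySem.Dict.counter cs).items 0 hgea
      have hsum : ((PySem.Dict.counter cs).items.map (fun p => p.2 - mn)).sum
          ≤ ((PySem.Dict.counter cs).items.map (fun p => p.2 - a)).sum := by
        apply List.sum_le_sum
        intro p _
        omega
      simp only [checkLoop, hf]
      rw [if_neg (by intro hcon; have := hcon.2; simp at this; omega)]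
      exact ih (a - 1) (by omega) (by push_cast at ha ⊢; omega)
    · rw [PySem.List.pyRange_neg_one_eq_nil (by omega)]
      rfl

-- a Nodup list whose members are all v, nonempty, is [v]
theorem pv_nodup_const (L : List Int) (v : Int) (hnd : L.Nodup) (hne : L ≠ [])
    (hall : ∀ x ∈ L, x = v) : L = [v] := by
  match L, hnd with
  | [], _ => exact absurd rfl hne
  | x :: rest, hnd =>
    have hx := hall x (by simp)
    subst hx
    cases rest with
    | nil => rfl
    | cons y t =>
      have hy := hall y (by simp)
      simp [hy] at hnd

-- main equivalence
-- all frequencies equal ⇔ pvNeed = 0 (helper facts about sums of nonnegatives)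
theorem pv_sum_zero (l : List Int) (hnn : ∀ x ∈ l, 0 ≤ x) (hs : l.sum ≤ 0) : ∀ x ∈ l, x = 0 := by
  induction l with
  | nil => simp
  | cons a t ih =>
    have ha : 0 ≤ a := hnn a (by simp)
    have htnn : ∀ x ∈ t, 0 ≤ x := fun x hx => hnn x (by simp [hx])
    have htsum : 0 ≤ t.sum := List.sum_nonneg htnn
    simp only [List.sum_cons] at hs
    intro x hx
    rcases List.mem_cons.mp hx with rfl | hm
    · omega
    · exact ih htnn (by omega) x hm

-- shared unfolding: when 0 ≠ k < len(s) and pvNeed ≤ k, A reaches its build at target mn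
-- and B reaches its skip-build; both sides written as the bare folds
theorem pv_unfold (s : String) (k : Int) (hcs : ¬ s.toList = []) (hk0 : k ≠ 0)
    (hkn : ¬ k ≥ (s.toList.length : Int)) (hrk : pvNeed s.toList ≤ k) :
    check s k = String.ofList ((s.toList.foldl (checkBuildStep (pvMn s.toList))
        ([], k - pvNeed s.toList, PySem.Dict.counter s.toList)).1)
    ∧ check_alt s k = String.ofList ((s.toList.foldl checkAltStep
        ([], (PySem.Dict.counter s.toList).items.foldl
          (fun d (p : Char × Int) => d.insert p.1 (p.2 - pvMn s.toList)) PySem.Dict.empty)).1) := by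
  set cs := s.toList with hcsdef
  have hn1 : 1 ≤ (cs.length : Int) := by
    have := List.length_pos_iff.mpr hcs; omega
  have hfne : pvFreqs cs ≠ [] := by
    obtain ⟨c0, cs', hcons⟩ := List.exists_cons_of_ne_nil hcs
    have : c0 ∈ (PySem.Set.ofList cs : List Char) :=
      (PySem.Set.mem_ofList cs c0).mpr (by rw [hcons]; simp)
    unfold pvFreqs
    intro hmapnil
    rw [List.map_eq_nil_iff] at hmapnil
    rw [hmapnil] at this
    simp at this
  obtain ⟨v, vs, hvv⟩ := List.exists_cons_of_ne_nil hfne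
  have hmn_def : pvMn cs = vs.foldl min v := by
    unfold pvMn; rw [hvv]
  set mn := pvMn cs with hmndef
  have hminq : PySem.List.min? (PySem.Dict.counter cs).values (fun v => v) = some mn := by
    rw [pv_values_counter, hvv, PySem.List.min?_id_cons, hmn_def]
  have hmnmem : mn ∈ pvFreqs cs := by
    have := PySem.List.min?_mem hminq
    rwa [pv_values_counter] at this
  have hmnmin : ∀ w ∈ pvFreqs cs, mn ≤ w := by
    intro w hw
    exact PySem.List.min?_isMin hminq w (by rwa [pv_values_counter])
  have hmn1 : 1 ≤ mn := by
    obtain ⟨c, hcK, hc⟩ := List.mem_map.mp hmnmem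
    have hcmem : c ∈ cs := (PySem.Set.mem_ofList cs c).mp hcK
    have : 0 < cs.count c := List.count_pos_iff.mpr hcmem
    omega
  set r := pvNeed cs with hrdef
  have hr_sum : ((pvFreqs cs).map (fun w => w - mn)).sum = r := by
    rw [hrdef]
    unfold pvNeed
    rw [hvv]
    dsimp only
    rw [hmn_def]
  have hitems : (PySem.Dict.counter cs).items
      = (PySem.Set.ofList cs : List Char).map (fun c => (c, (cs.count c : Int))) :=
    PySem.Dict.items_counter cs
  have hsum_items : ((PySem.Dict.counter cs).items.map (fun p => p.2 - mn)).sum = r := by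
    rw [hitems, List.map_map, ← hr_sum]
    unfold pvFreqs
    rw [List.map_map]
    rfl
  have hge_items : ∀ p ∈ (PySem.Dict.counter cs).items, mn ≤ p.2 := by
    intro p hp
    rw [hitems] at hp
    obtain ⟨c, hcK, rfl⟩ := List.mem_map.mp hp
    exact hmnmin _ (List.mem_map.mpr ⟨c, hcK, rfl⟩)
  have hsne : s ≠ "" := fun h => hcs (by rw [hcsdef, h]; rfl)
  have hmaxq : PySem.List.max? (PySem.Dict.counter cs).values (fun v => v)
      = some (vs.foldl max v) := by
    rw [pv_values_counter, hvv, PySem.List.max?_id_cons]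
  set mx := vs.foldl max v with hmxdef
  have hmnmx : mn ≤ mx := PySem.List.max?_isMax hmaxq mn (by rwa [pv_values_counter])
  have hlt : ∀ t : Int, mn < t → ∃ p ∈ (PySem.Dict.counter cs).items, p.2 < t := by
    intro t ht
    obtain ⟨c, hcK, hc⟩ := List.mem_map.mp hmnmem
    exact ⟨(c, (cs.count c : Int)),
      by rw [hitems]; exact List.mem_map.mpr ⟨c, hcK, rfl⟩, by simp; omega⟩
  have hfeas := pv_feas_true mn (PySem.Dict.counter cs).items 0 hge_items
  rw [hsum_items, zero_add] at hfeas
  constructor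
  · simp only [check]
    rw [← hcsdef]
    rw [if_neg hk0, if_neg hkn, hmaxq]
    dsimp only
    rw [show mx = mn + (((mx - mn).toNat : Nat) : Int) by omega]
    rw [pv_loop_descend cs k mn (by omega) hlt ((mx - mn).toNat)]
    rw [PySem.List.pyRange_neg_one_cons (by omega : (0:Int) < mn)]
    simp only [checkLoop, hfeas]
    rw [if_pos (by exact ⟨trivial, by simpa using hrk⟩)]
  · simp only [check_alt]
    rw [← hcsdef]
    rw [if_neg (by
          push Not
          refine ⟨by obtain ⟨c0, cs', hcons⟩ := List.exists_cons_of_ne_nil hcs; rw [hcons]; simp,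
            by omega⟩),
        hminq]
    dsimp only
    rw [if_neg (by rw [pv_values_counter, hr_sum]; omega)]

-- A's build keeps at least len(suffix) - rem characters
theorem pv_len_A (mn : Int) :
    ∀ (suffix res : List Char) (rem : Int) (temp : PySem.Dict Char Int),
    (∀ c, (suffix.count c : Int) ≤ temp.getD c 0) → 0 ≤ rem →
    (res.length : Int) + suffix.length - rem
      ≤ ((suffix.foldl (checkBuildStep mn) (res, rem, temp)).1.length : Int) := by
  intro suffix
  induction suffix with
  | nil => intro res rem temp _ hrem; simp; omega
  | cons ch t ih =>
    intro res rem temp hcnt hrem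
    have hcountc : ∀ c, (t.count c : Int) ≤ ((ch :: t).count c : Int) := by
      intro c
      have h : t.count c ≤ (ch :: t).count c := by
        simp only [List.count_cons]; split <;> omega
      exact_mod_cast h
    have hcnt' : ∀ c, (t.count c : Int) ≤ (temp.modify c 0 (· - 1)).getD c 0 ∨ True := fun _ => Or.inr trivial
    have htpos : temp.getD ch 0 > 0 := by
      have h2 := hcnt ch
      have h3 : (1 : Int) ≤ ((ch :: t).count ch : Int) := by
        simp
      omega
    have hstep : ∀ c, (t.count c : Int) ≤ (temp.modify ch 0 (· - 1)).getD c 0 := by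
      intro c
      rw [PySem.Dict.getD_modify]
      by_cases hc : c = ch
      · rw [if_pos hc]
        have h2 := hcnt ch
        have h3 : (t.count ch : Int) + 1 = ((ch :: t).count ch : Int) := by
          simp
        rw [hc]
        omega
      · rw [if_neg hc]
        have h2 := hcnt c
        have h3 := hcountc c
        omega
    simp only [List.foldl_cons]
    by_cases hdel : temp.getD ch 0 > mn ∧ rem > 0
    · rw [show checkBuildStep mn (res, rem, temp) ch
          = (res, rem - 1, temp.modify ch 0 (· - 1)) by
        simp [checkBuildStep, hdel.1, hdel.2]]
      have := ih res (rem - 1) (temp.modify ch 0 (· - 1)) hstep (by omega)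
      simp only [List.length_cons]
      push_cast at this ⊢
      omega
    · rw [show checkBuildStep mn (res, rem, temp) ch
          = (res ++ [ch], rem, temp.modify ch 0 (· - 1)) by
        simp only [checkBuildStep]
        rw [if_neg hdel, if_pos htpos]]
      have := ih (res ++ [ch]) rem (temp.modify ch 0 (· - 1)) hstep hrem
      simp only [List.length_cons, List.length_append, List.length_cons, List.length_nil] at this ⊢
      push_cast at this ⊢
      omega

-- B's build keeps exactly len(suffix) - (total skip budget) characters
theorem pv_len_B :
    ∀ (suffix res : List Char) (skip : PySem.Dict Char Int),
    skip.keys.Nodup → (∀ c ∈ suffix, c ∈ skip.keys) →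
    (∀ c, 0 ≤ skip.getD c 0) → (∀ c, skip.getD c 0 ≤ (suffix.count c : Int)) →
    (((suffix.foldl checkAltStep (res, skip)).1.length : Int))
      = res.length + suffix.length - (skip.keys.map (fun c => skip.getD c 0)).sum := by
  intro suffix
  induction suffix with
  | nil =>
    intro res skip hnd _ hnn hle
    have hz : ∀ c, skip.getD c 0 = 0 := by
      intro c
      have h1 := hnn c
      have h2 := hle c
      simp at h2
      omega
    have : (skip.keys.map (fun c => skip.getD c 0)).sum = 0 :=
      List.sum_eq_zero (by
        intro x hx
        obtain ⟨c, _, rfl⟩ := List.mem_map.mp hx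
        exact hz c)
    simp [this]
  | cons ch t ih =>
    intro res skip hnd hmem hnn hle
    have hchK : ch ∈ skip.keys := hmem ch (by simp)
    have hcount_t : ∀ c, c ≠ ch → (t.count c : Int) = ((ch :: t).count c : Int) := by
      intro c hc
      have : t.count c = (ch :: t).count c := by
        simp [Ne.symm hc]
      exact_mod_cast this
    have hcount_ch : (t.count ch : Int) + 1 = ((ch :: t).count ch : Int) := by
      have : t.count ch + 1 = (ch :: t).count ch := by simp
      exact_mod_cast this
    simp only [List.foldl_cons]
    by_cases hpos : skip.getD ch 0 > 0
    · rw [show checkAltStep (res, skip) ch = (res, skip.modify ch 0 (· - 1)) by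
        simp [checkAltStep, hpos]]
      have hrec := ih res (skip.modify ch 0 (· - 1))
        (by rw [pv_keys_modify_mem hchK]; exact hnd)
        (by intro c hc; rw [pv_keys_modify_mem hchK]; exact hmem c (by simp [hc]))
        (by
          intro c
          rw [PySem.Dict.getD_modify]
          by_cases hc : c = ch
          · rw [if_pos hc]; omega
          · rw [if_neg hc]; exact hnn c)
        (by
          intro c
          rw [PySem.Dict.getD_modify]
          by_cases hc : c = ch
          · rw [if_pos hc, hc]
            have := hle ch
            omega
          · rw [if_neg hc]
            have := hle c
            rw [← hcount_t c hc] at this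
            exact this)
      rw [hrec, pv_keys_modify_mem hchK,
          pv_sum_map_update skip.keys (fun c => skip.getD c 0)
            (fun c => (skip.modify ch 0 (· - 1)).getD c 0) ch hnd hchK
            (by
              intro c
              dsimp only
              rw [PySem.Dict.getD_modify]
              by_cases hc : c = ch
              · rw [if_pos hc, if_pos hc, hc]
              · rw [if_neg hc, if_neg hc])]
      simp only [List.length_cons]
      push_cast
      ring
    · have hz : skip.getD ch 0 = 0 := le_antisymm (not_lt.mp hpos) (hnn ch)
      rw [show checkAltStep (res, skip) ch = (res ++ [ch], skip) by
        simp [checkAltStep, hz]]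
      have hrec := ih (res ++ [ch]) skip hnd
        (fun c hc => hmem c (by simp [hc]))
        hnn
        (by
          intro c
          by_cases hc : c = ch
          · rw [hc, hz]
            exact Int.natCast_nonneg _
          · rw [hcount_t c hc]
            exact hle c)
      rw [hrec]
      simp only [List.length_cons, List.length_append, List.length_cons, List.length_nil]
      push_cast
      ring

theorem pv_main (s : String) (k : Int) (hpre : Pre_check s k) (hnd : ¬ D_check s k) :
    check s k = check_alt s k := by
  by_cases hcs : s.toList = []
  · -- s = ""
    have hs : s = "" := String.toList_eq_nil_iff.mp hcs
    subst hs
    have hk : 0 ≤ k := by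
      by_contra hneg
      exact hpre ⟨rfl, by omega⟩
    by_cases hk0 : k = 0
    · subst hk0; decide
    · have hkpos : 0 < k := lt_of_le_of_ne hk (Ne.symm hk0)
      simp only [check, check_alt]
      rw [if_neg hk0, if_pos (by simp; omega)]
      simp
  · -- s nonempty
    obtain ⟨c0, cs', hcons⟩ := List.exists_cons_of_ne_nil hcs
    set cs := s.toList with hcsdef
    have hn1 : 1 ≤ (cs.length : Int) := by
      rw [hcons]; simp
    -- frequency list facts
    have hfne : pvFreqs cs ≠ [] := by
      have : c0 ∈ (PySem.Set.ofList cs : List Char) :=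
        (PySem.Set.mem_ofList cs c0).mpr (by rw [hcons]; simp)
      unfold pvFreqs
      intro hmapnil
      rw [List.map_eq_nil_iff] at hmapnil
      rw [hmapnil] at this
      simp at this
    obtain ⟨v, vs, hvv⟩ := List.exists_cons_of_ne_nil hfne
    have hmn_def : pvMn cs = vs.foldl min v := by
      unfold pvMn; rw [hvv]
    set mn := pvMn cs with hmndef
    have hminq : PySem.List.min? (PySem.Dict.counter cs).values (fun v => v) = some mn := by
      rw [pv_values_counter, hvv, PySem.List.min?_id_cons, hmn_def]
    have hmnmem : mn ∈ pvFreqs cs := by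
      have := PySem.List.min?_mem hminq
      rwa [pv_values_counter] at this
    have hmnmin : ∀ w ∈ pvFreqs cs, mn ≤ w := by
      intro w hw
      exact PySem.List.min?_isMin hminq w (by rwa [pv_values_counter])
    have hmn1 : 1 ≤ mn := by
      obtain ⟨c, hcK, hc⟩ := List.mem_map.mp hmnmem
      have hcmem : c ∈ cs := (PySem.Set.mem_ofList cs c).mp hcK
      have : 0 < cs.count c := List.count_pos_iff.mpr hcmem
      omega
    set r := pvNeed cs with hrdef
    have hr_sum : ((pvFreqs cs).map (fun w => w - mn)).sum = r := by
      rw [hrdef]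
      unfold pvNeed
      rw [hvv]
      dsimp only
      rw [hmn_def]
    have hterm_nn : ∀ x ∈ (pvFreqs cs).map (fun w => w - mn), 0 ≤ x := by
      intro x hx
      obtain ⟨w, hw, rfl⟩ := List.mem_map.mp hx
      have := hmnmin w hw
      omega
    have hr0 : 0 ≤ r := by rw [← hr_sum]; exact List.sum_nonneg hterm_nn
    have hitems : (PySem.Dict.counter cs).items
        = (PySem.Set.ofList cs : List Char).map (fun c => (c, (cs.count c : Int))) :=
      PySem.Dict.items_counter cs
    have hsum_items : ((PySem.Dict.counter cs).items.map (fun p => p.2 - mn)).sum = r := by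
      rw [hitems, List.map_map, ← hr_sum]
      unfold pvFreqs
      rw [List.map_map]
      rfl
    have hge_items : ∀ p ∈ (PySem.Dict.counter cs).items, mn ≤ p.2 := by
      intro p hp
      rw [hitems] at hp
      obtain ⟨c, hcK, rfl⟩ := List.mem_map.mp hp
      exact hmnmin _ (List.mem_map.mpr ⟨c, hcK, rfl⟩)
    -- B's need equals r
    have hneed : (((PySem.Dict.counter cs).values).map (fun cnt => cnt - mn)).sum = r := by
      rw [pv_values_counter]; exact hr_sum
    by_cases hk0 : k = 0
    · -- k = 0: A's dedicated branch vs B's need-check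
      by_cases hreq : r = 0
      · -- all frequencies equal: A returns s, B keeps everything
        have hallmn : ∀ w ∈ pvFreqs cs, w = mn := by
          intro w hw
          have hz := pv_sum_zero _ hterm_nn
            (by rw [hr_sum]; omega) (w - mn)
            (List.mem_map.mpr ⟨w, hw, rfl⟩)
          omega
        have hsne : s ≠ "" := fun h => hcs (by rw [hcsdef, h]; rfl)
        have hset : (PySem.Set.ofList (PySem.Dict.counter cs).values : List Int) = [mn] := by
          rw [pv_values_counter]
          apply pv_nodup_const _ mn (PySem.Set.nodup_ofList _)
          · exact List.ne_nil_of_mem ((PySem.Set.mem_ofList _ _).mpr hmnmem)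
          · intro x hx; exact hallmn x ((PySem.Set.mem_ofList _ _).mp hx)
        have hskipz : ∀ c, ((PySem.Dict.counter cs).items.foldl
            (fun d (p : Char × Int) => d.insert p.1 (p.2 - mn)) PySem.Dict.empty).getD c 0 = 0 := by
          intro c
          rw [pv_skip0_getD]
          by_cases hc : c ∈ cs
          · rw [if_pos hc]
            have := hallmn _ (List.mem_map.mpr ⟨c, (PySem.Set.mem_ofList _ _).mpr hc, rfl⟩)
            omega
          · rw [if_neg hc]
        simp only [check, check_alt]
        rw [if_pos hk0, if_pos (by rw [hset]; rfl),
            if_neg (by push Not; refine ⟨by simp; exact hsne, by rw [← hcsdef]; omega⟩),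
            hminq]
        dsimp only
        rw [if_neg (by rw [hneed]; omega)]
        rw [pv_altfold_zero _ _ _ hskipz, List.nil_append]
        exact String.ofList_toList.symm
      · -- unequal frequencies, k = 0: both return ""
        have hrpos : 0 < r := lt_of_le_of_ne hr0 (Ne.symm hreq)
        have hex : ∃ w ∈ pvFreqs cs, mn < w := by
          by_contra hno
          push Not at hno
          have hall : ∀ x ∈ (pvFreqs cs).map (fun w => w - mn), x = 0 := by
            intro x hx
            obtain ⟨w, hw, rfl⟩ := List.mem_map.mp hx
            have h1 := hmnmin w hw
            have h2 := hno w hw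
            omega
          have := List.sum_eq_zero hall
          rw [hr_sum] at this
          omega
        have hlen : ((PySem.Set.ofList (PySem.Dict.counter cs).values : List Int)).length ≠ 1 := by
          intro h1
          obtain ⟨a, ha⟩ := List.length_eq_one_iff.mp h1
          rw [pv_values_counter] at ha
          obtain ⟨w, hw, hwlt⟩ := hex
          have hmn_in : mn ∈ (PySem.Set.ofList (pvFreqs cs) : List Int) :=
            (PySem.Set.mem_ofList _ _).mpr hmnmem
          have hw_in : w ∈ (PySem.Set.ofList (pvFreqs cs) : List Int) :=
            (PySem.Set.mem_ofList _ _).mpr hw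
          rw [ha] at hmn_in hw_in
          simp at hmn_in hw_in
          omega
        have hsne : s ≠ "" := fun h => hcs (by rw [hcsdef, h]; rfl)
        simp only [check, check_alt]
        rw [if_pos hk0, if_neg hlen,
            if_neg (by
              push Not
              refine ⟨by simp; exact hsne, by rw [← hcsdef]; omega⟩),
            hminq]
        dsimp only
        rw [if_pos (by rw [hneed]; omega)]
    · by_cases hkn : k ≥ (cs.length : Int)
      · -- k ≥ len(s): both return ""
        simp only [check, check_alt]
        rw [if_neg hk0, if_pos hkn, if_pos (Or.inr hkn)]
      · -- 0 ≠ k < len(s): A's target loop vs B's direct build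
        have hsne : s ≠ "" := fun h => hcs (by rw [hcsdef, h]; rfl)
        have hmaxq : PySem.List.max? (PySem.Dict.counter cs).values (fun v => v)
            = some (vs.foldl max v) := by
          rw [pv_values_counter, hvv, PySem.List.max?_id_cons]
        set mx := vs.foldl max v with hmxdef
        have hmnmx : mn ≤ mx := by
          have := PySem.List.max?_isMax hmaxq mn (by rwa [pv_values_counter])
          exact this
        have hlt : ∀ t : Int, mn < t → ∃ p ∈ (PySem.Dict.counter cs).items, p.2 < t := by
          intro t ht
          obtain ⟨c, hcK, hc⟩ := List.mem_map.mp hmnmem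
          exact ⟨(c, (cs.count c : Int)),
            by rw [hitems]; exact List.mem_map.mpr ⟨c, hcK, rfl⟩, by simp; omega⟩
        have hfeas := pv_feas_true mn (PySem.Dict.counter cs).items 0 hge_items
        rw [hsum_items, zero_add] at hfeas
        simp only [check, check_alt]
        rw [← hcsdef]
        rw [if_neg hk0, if_neg hkn, hmaxq]
        dsimp only
        rw [if_neg (by
              push Not
              refine ⟨by rw [hcons]; simp, by omega⟩),
            hminq]
        dsimp only
        rw [show mx = mn + (((mx - mn).toNat : Nat) : Int) by omega]
        rw [pv_loop_descend cs k mn (by omega) hlt ((mx - mn).toNat)]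
        rw [PySem.List.pyRange_neg_one_cons (by omega : (0:Int) < mn)]
        simp only [checkLoop, hfeas]
        by_cases hrk : r ≤ k
        · -- both build; budgets suffice since ¬D gives 2r ≤ k
          have h2r : 2 * r ≤ k := by
            by_contra h2
            exact hnd ⟨hk0, by rw [← hcsdef]; omega, by rw [← hcsdef] at *; omega,
              by rw [← hcsdef] at *; omega⟩
          rw [if_pos (by exact ⟨trivial, by simpa using hrk⟩), if_neg (by rw [hneed]; omega)]
          congr 1
          apply pv_build_eq
          · intro c
            rw [pv_skip0_getD, PySem.Dict.getD_counter]
            by_cases hc : c ∈ cs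
            · rw [if_pos hc]
              have := hmnmin _ (List.mem_map.mpr ⟨c, (PySem.Set.mem_ofList _ _).mpr hc, rfl⟩)
              omega
            · rw [if_neg hc]
              have : cs.count c = 0 := List.count_eq_zero.mpr hc
              rw [this]
              have : max ((0:Int) - mn) 0 = 0 := max_eq_right (by omega)
              omega
          · intro c
            rw [PySem.Dict.getD_counter]
          · rw [pv_skip0_keys]; exact PySem.Set.nodup_ofList cs
          · intro c hc
            rw [pv_skip0_keys]
            exact (PySem.Set.mem_ofList _ _).mpr hc
          · rw [pv_skip0_keys]
            have hmapeq : ((PySem.Set.ofList cs : List Char).map (fun c =>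
                ((PySem.Dict.counter cs).items.foldl
                  (fun d (p : Char × Int) => d.insert p.1 (p.2 - mn)) PySem.Dict.empty).getD c 0))
                = (PySem.Set.ofList cs : List Char).map (fun c => (cs.count c : Int) - mn) := by
              apply List.map_congr_left
              intro c hcK
              rw [pv_skip0_getD, if_pos ((PySem.Set.mem_ofList _ _).mp hcK)]
            rw [hmapeq]
            rw [show ((PySem.Set.ofList cs : List Char).map (fun c => (cs.count c : Int) - mn)).sum
                = r from by
              rw [← hr_sum]; unfold pvFreqs; rw [List.map_map]; rfl]
            omega
        · -- removals exceed k: the whole descending loop fails, B refuses too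
          rw [if_neg (by intro hcon; have := hcon.2; simp at this; omega)]
          rw [pv_loop_allfail cs k mn hge_items
              (by rw [hsum_items]; omega) (mn - 1).toNat (mn - 1) (by omega) (by omega)]
          rw [if_pos (by rw [hneed]; omega)]

-- inside D_check the two results even have different lengths: A deletes only k - pvNeed
-- characters before its budget runs out, B deletes all pvNeed of them
theorem pv_tight (s : String) (k : Int) (hd : D_check s k) : check s k ≠ check_alt s k := by
  obtain ⟨hk0, hklen, hrk, h2r⟩ := hd
  set cs := s.toList with hcsdef
  set r := pvNeed cs with hrdef
  have hrpos : 0 < r := by omega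
  have hcs : ¬ cs = [] := by
    intro h
    rw [h] at hklen
    simp at hklen
    omega
  have hfne : pvFreqs cs ≠ [] := by
    obtain ⟨c0, cs', hcons⟩ := List.exists_cons_of_ne_nil hcs
    have : c0 ∈ (PySem.Set.ofList cs : List Char) :=
      (PySem.Set.mem_ofList cs c0).mpr (by rw [hcons]; simp)
    unfold pvFreqs
    intro hmapnil
    rw [List.map_eq_nil_iff] at hmapnil
    rw [hmapnil] at this
    simp at this
  obtain ⟨v, vs, hvv⟩ := List.exists_cons_of_ne_nil hfne
  have hmn_def : pvMn cs = vs.foldl min v := by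
    unfold pvMn; rw [hvv]
  set mn := pvMn cs with hmndef
  have hminq : PySem.List.min? (PySem.Dict.counter cs).values (fun v => v) = some mn := by
    rw [pv_values_counter, hvv, PySem.List.min?_id_cons, hmn_def]
  have hmnmem : mn ∈ pvFreqs cs := by
    have := PySem.List.min?_mem hminq
    rwa [pv_values_counter] at this
  have hmnmin : ∀ w ∈ pvFreqs cs, mn ≤ w := by
    intro w hw
    exact PySem.List.min?_isMin hminq w (by rwa [pv_values_counter])
  have hmn1 : 1 ≤ mn := by
    obtain ⟨c, hcK, hc⟩ := List.mem_map.mp hmnmem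
    have hcmem : c ∈ cs := (PySem.Set.mem_ofList cs c).mp hcK
    have : 0 < cs.count c := List.count_pos_iff.mpr hcmem
    omega
  have hr_sum : ((pvFreqs cs).map (fun w => w - mn)).sum = r := by
    rw [hrdef]
    unfold pvNeed
    rw [hvv]
    dsimp only
    rw [hmn_def]
  obtain ⟨hA, hB⟩ := pv_unfold s k hcs hk0 (by rw [← hcsdef]; omega) hrk
  rw [hA, hB]
  intro heq
  have hlist := congrArg String.toList heq
  rw [String.toList_ofList, String.toList_ofList] at hlist
  have hlen := congrArg List.length hlist
  -- A keeps at least len - (k - r) characters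
  have hlenA := pv_len_A mn cs [] (k - r) (PySem.Dict.counter cs)
    (by intro c; rw [PySem.Dict.getD_counter]) (by omega)
  -- B keeps exactly len - r characters
  have hlenB := pv_len_B cs [] ((PySem.Dict.counter cs).items.foldl
      (fun d (p : Char × Int) => d.insert p.1 (p.2 - mn)) PySem.Dict.empty)
    (by rw [pv_skip0_keys]; exact PySem.Set.nodup_ofList cs)
    (by intro c hc; rw [pv_skip0_keys]; exact (PySem.Set.mem_ofList _ _).mpr hc)
    (by
      intro c
      rw [pv_skip0_getD]
      by_cases hc : c ∈ cs
      · rw [if_pos hc]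
        have := hmnmin _ (List.mem_map.mpr ⟨c, (PySem.Set.mem_ofList _ _).mpr hc, rfl⟩)
        omega
      · rw [if_neg hc])
    (by
      intro c
      rw [pv_skip0_getD]
      by_cases hc : c ∈ cs
      · rw [if_pos hc]; omega
      · rw [if_neg hc]
        exact Int.natCast_nonneg _)
  rw [pv_skip0_keys] at hlenB
  have hmapeq : ((PySem.Set.ofList cs : List Char).map (fun c =>
      ((PySem.Dict.counter cs).items.foldl
        (fun d (p : Char × Int) => d.insert p.1 (p.2 - mn)) PySem.Dict.empty).getD c 0))
      = (PySem.Set.ofList cs : List Char).map (fun c => (cs.count c : Int) - mn) := by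
    apply List.map_congr_left
    intro c hcK
    rw [pv_skip0_getD, if_pos ((PySem.Set.mem_ofList _ _).mp hcK)]
  rw [hmapeq,
      show ((PySem.Set.ofList cs : List Char).map (fun c => (cs.count c : Int) - mn)).sum
        = r from by rw [← hr_sum]; unfold pvFreqs; rw [List.map_map]; rfl] at hlenB
  rw [hlist] at hlenA
  rw [hlenB] at hlenA
  simp at hlenA
  omega

-- ===== VERDICT (by name: the statement is the Claim_ definition above) =====
theorem check_spec : Claim_unchanged_check := by
  intro s k _ hpre hnd
  exact pv_main s k hpre hnd

theorem check_changed : Claim_changed_check := by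
  unfold Claim_changed_check; decide

theorem check_tight : Claim_exact_check := by
  intro s k _ _ hd
  exact pv_tight s k hd
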